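-- pv_equiv track=rewrite | github.com/Aaz0og/NSI | PROJETS/PROJET V2/Niels Romain 23-12.py | trouvercarres
-- ===== SOURCE A (Python) =====
-- def trouvercarres(x, y):
--     sol = 0
--     for lentx in x:
--         for rapidex in x:
--             for lenty in y:
--                 for rapidey in y:
--                     if rapidex - lentx == rapidey - lenty:
--                         sol += 1
--     return sol
-- ===== SOURCE B (Python) =====
-- def trouvercarres(x, y):
--     cy = {}
--     for lenty in y:
--         for rapidey in y:
--             d = rapidey - lenty
--             cy[d] = cy.get(d, 0) + 1
--     sol = 0
--     for lentx in x:
--         for rapidex in x: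
--             sol += cy.get(rapidex - lentx, 0)
--     return sol
-- ===== Notes on version B (the rewrite author's own statement) =====
-- stated objective: faster
-- what changed: Replaced the quadruple nested loop by a histogram of y-pair differences built once, then for each x-pair a single dictionary lookup adds the number of matching y-pairs.
import Mathlib
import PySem

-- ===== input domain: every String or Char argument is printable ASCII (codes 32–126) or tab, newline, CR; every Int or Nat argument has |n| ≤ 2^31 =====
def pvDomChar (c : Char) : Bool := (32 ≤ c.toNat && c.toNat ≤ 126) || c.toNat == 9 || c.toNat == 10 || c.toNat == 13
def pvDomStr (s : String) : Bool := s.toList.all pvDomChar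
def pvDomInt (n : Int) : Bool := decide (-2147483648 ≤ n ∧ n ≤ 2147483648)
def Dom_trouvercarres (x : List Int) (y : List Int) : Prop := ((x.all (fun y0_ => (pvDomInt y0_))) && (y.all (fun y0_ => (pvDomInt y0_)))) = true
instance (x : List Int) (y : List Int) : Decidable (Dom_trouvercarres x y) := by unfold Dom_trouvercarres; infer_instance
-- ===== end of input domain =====

-- B replaces A's quadruple nested loop by a histogram of y-pair differences (built once) plus one lookup per x-pair: asymptotically faster.


-- ===== PORT A =====
def trouvercarres (x : List Int) (y : List Int) : Int :=
  x.foldl (fun sol lentx =>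
    x.foldl (fun sol rapidex =>
      y.foldl (fun sol lenty =>
        y.foldl (fun sol rapidey =>
          if rapidex - lentx == rapidey - lenty then sol + 1 else sol) sol) sol) sol) 0

-- ===== PORT B =====
def trouvercarres_alt (x : List Int) (y : List Int) : Int :=
  let cy : PySem.Dict Int Int :=
    y.foldl (fun cy lenty =>
      y.foldl (fun cy rapidey =>
        cy.insert (rapidey - lenty) (cy.getD (rapidey - lenty) 0 + 1)) cy) PySem.Dict.empty
  x.foldl (fun sol lentx =>
    x.foldl (fun sol rapidex =>
      sol + cy.getD (rapidex - lentx) 0) sol) 0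

-- ===== PRECONDITION & SPEC =====
def Spec_trouvercarres (x : List Int) (y : List Int) (out : Int) : Prop := out = trouvercarres_alt x y
instance (x : List Int) (y : List Int) (out : Int) : Decidable (Spec_trouvercarres x y out) := by unfold Spec_trouvercarres; infer_instance

-- ===== CLAIM (what is proved, stated in full; the proofs are below) =====
def Claim_equal_trouvercarres : Prop := ∀ (x : List Int) (y : List Int), Dom_trouvercarres x y → Spec_trouvercarres x y (trouvercarres x y)

-- ===== LEMMAS AND PROOFS =====

-- one inner y-loop of B's counter build
theorem pv_build_inner (y : List Int) (lenty v : Int) (d : PySem.Dict Int Int) :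
    (y.foldl (fun d rapidey => d.insert (rapidey - lenty) (d.getD (rapidey - lenty) 0 + 1)) d).getD v 0
      = d.getD v 0 + ((y.map (fun rapidey => rapidey - lenty)).count v : Int) := by
  rw [← List.foldl_map (f := fun rapidey => rapidey - lenty)
      (g := fun (d : PySem.Dict Int Int) t => d.insert t (d.getD t 0 + 1))]
  exact PySem.Dict.getD_foldl_insert_add_one _ _ _

-- the whole counter build: getD reads off the count of v among the y-pair differences
theorem pv_build (l y : List Int) (v : Int) (d : PySem.Dict Int Int) :
    (l.foldl (fun cy lenty =>
        y.foldl (fun cy rapidey => cy.insert (rapidey - lenty) (cy.getD (rapidey - lenty) 0 + 1)) cy) d).getD v 0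
      = d.getD v 0 + ((l.flatMap (fun lenty => y.map (fun rapidey => rapidey - lenty))).count v : Int) := by
  induction l generalizing d with
  | nil => simp
  | cons ly l ih =>
    rw [List.foldl_cons, ih, pv_build_inner, List.flatMap_cons, List.count_append]
    push_cast
    ring

-- one innermost y-loop of A counts matches of v among the differences to lenty
theorem pv_a_innermost (y : List Int) (lenty v sol : Int) :
    (y.foldl (fun sol rapidey => if v == rapidey - lenty then sol + 1 else sol) sol)
      = sol + ((y.map (fun rapidey => rapidey - lenty)).count v : Int) := by
  rw [← List.foldl_map (f := fun rapidey => rapidey - lenty)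
      (g := fun (sol : Int) t => if v == t then sol + 1 else sol)]
  rw [PySem.List.foldl_if_add_one (fun t => v == t)]
  congr 2
  simp only [List.count]
  exact List.countP_congr (fun t _ => by simp only [beq_iff_eq]; exact eq_comm)

-- counting v in the concatenated difference lists, summand by summand
theorem pv_count_flatMap (l y : List Int) (v : Int) :
    ((l.flatMap (fun a => y.map (fun b => b - a))).count v : Int)
      = (l.map (fun a => ((y.map (fun b => b - a)).count v : Int))).sum := by
  induction l with
  | nil => simp
  | cons a l ih =>
    rw [List.flatMap_cons, List.count_append, List.map_cons, List.sum_cons, ← ih]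
    push_cast
    ring

-- A's inner double y-loop counts matches of v among all y-pair differences
theorem pv_a_inner (l y : List Int) (v sol : Int) :
    (l.foldl (fun sol lenty =>
        y.foldl (fun sol rapidey => if v == rapidey - lenty then sol + 1 else sol) sol) sol)
      = sol + ((l.flatMap (fun lenty => y.map (fun rapidey => rapidey - lenty))).count v : Int) := by
  simp only [pv_a_innermost]
  rw [PySem.List.foldl_add l (fun lenty => ((y.map (fun rapidey => rapidey - lenty)).count v : Int)) sol,
      pv_count_flatMap]

-- ===== VERDICT (by name: the statement is the Claim_ definition above) =====
theorem trouvercarres_spec : Claim_equal_trouvercarres := by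
  intro x y _
  show trouvercarres x y = trouvercarres_alt x y
  unfold trouvercarres trouvercarres_alt
  simp only [pv_a_inner, pv_build, PySem.Dict.getD_empty, zero_add]
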